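-- pv_equiv track=rewrite | github.com/MrBrantCode/unitest_baseline | mut_generate/mist_train_cf/cf_94787/solution.py | sum_of_prime_squares_and_count
-- ===== SOURCE A (Python) =====
-- import math
--
-- def sum_of_prime_squares_and_count(n):
--     def is_prime(i):
--         if i < 2:
--             return False
--         for j in range(2, int(math.sqrt(i)) + 1):
--             if i % j == 0:
--                 return False
--         return True
--
--     sum_of_squares = 0
--     count = 0
--
--     for i in range(1, n + 1):
--         if is_prime(i):
--             sum_of_squares += i ** 2
--             count += 1
--
--     return sum_of_squares, count
-- ===== SOURCE B (Python) =====
-- def sum_of_prime_squares_and_count(n):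
--     # Sieve: mark every composite <= n by striding over the multiples of each d >= 2.
--     comp = [False] * (n + 1 if n >= 0 else 0)
--     for d in range(2, n // 2 + 1):
--         for m in range(d + d, n + 1, d):
--             comp[m] = True
--     s = 0
--     c = 0
--     for i in range(2, n + 1):
--         if not comp[i]:
--             s += i * i
--             c += 1
--     return s, c
-- ===== Notes on version B (the rewrite author's own statement) =====
-- stated objective: faster
-- what changed: replaces per-number trial division up to sqrt(i) by a sieve that marks all composite products d*q <= n once and then sums squares of the unmarked numbers
import Mathlib
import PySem

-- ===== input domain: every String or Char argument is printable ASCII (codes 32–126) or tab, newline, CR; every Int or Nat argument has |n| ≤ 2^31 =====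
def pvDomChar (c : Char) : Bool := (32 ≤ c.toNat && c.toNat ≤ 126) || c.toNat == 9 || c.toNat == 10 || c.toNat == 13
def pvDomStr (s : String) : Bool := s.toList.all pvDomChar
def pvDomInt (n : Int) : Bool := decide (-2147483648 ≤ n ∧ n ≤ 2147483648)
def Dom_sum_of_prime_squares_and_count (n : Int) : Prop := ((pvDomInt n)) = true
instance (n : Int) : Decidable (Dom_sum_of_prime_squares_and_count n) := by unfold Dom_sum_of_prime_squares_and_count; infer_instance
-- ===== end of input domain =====

-- B replaces A's per-number trial division by a sieve marking the composites d*q ≤ n once (faster).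

-- ===== PORT A =====
-- int(math.sqrt(i)): on the domain (0 ≤ i ≤ 2^31) the float sqrt floors to the exact integer square root
def pvSqrtA (i : Int) : Int := (Nat.sqrt i.toNat : Int)

-- the 'for j in range(...): if i % j == 0: return False' loop of is_prime
def pvTrialA (i : Int) : List Int → Bool
  | [] => true
  | j :: rest => if PySem.Int.mod i j == 0 then false else pvTrialA i rest

def pvIsPrimeA (i : Int) : Bool :=
  if i < 2 then false
  else pvTrialA i (PySem.List.pyRange 2 (pvSqrtA i + 1) 1)

def sum_of_prime_squares_and_count (n : Int) : List Int :=
  let r := (PySem.List.pyRange 1 (n + 1) 1).foldl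
    (fun (acc : Int × Int) i => if pvIsPrimeA i then (acc.1 + i ^ 2, acc.2 + 1) else acc)
    (0, 0)
  [r.1, r.2]

-- ===== PORT B =====
-- comp = [False]*(n+1), an Array for the O(1) cell assignment of a Python list;
-- every index used is provably nonnegative and in range (m ≥ d+d ≥ 4, m ≤ n < len comp;
-- 2 ≤ i ≤ n), so setIfInBounds/getElem?.getD are exact there
def pvSieve (n : Int) : Array Bool :=
  (PySem.List.pyRange 2 (PySem.Int.floordiv n 2 + 1) 1).foldl
    (fun comp d =>
      (PySem.List.pyRange (d + d) (n + 1) d).foldl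
        (fun comp m => comp.setIfInBounds m.toNat true) comp)
    (Array.replicate (if 0 ≤ n then (n + 1).toNat else 0) false)

def sum_of_prime_squares_and_count_alt (n : Int) : List Int :=
  let comp := pvSieve n
  let r := (PySem.List.pyRange 2 (n + 1) 1).foldl
    (fun (acc : Int × Int) i =>
      if !(comp[i.toNat]?.getD false) then (acc.1 + i * i, acc.2 + 1) else acc)
    (0, 0)
  [r.1, r.2]

-- ===== PRECONDITION & SPEC =====
def Spec_sum_of_prime_squares_and_count (n : Int) (out : List Int) : Prop := out = sum_of_prime_squares_and_count_alt n
instance (n : Int) (out : List Int) : Decidable (Spec_sum_of_prime_squares_and_count n out) := by unfold Spec_sum_of_prime_squares_and_count; infer_instance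

-- ===== CLAIM (what is proved, stated in full; the proofs are below) =====
def Claim_equal_sum_of_prime_squares_and_count : Prop := ∀ (n : Int), Dom_sum_of_prime_squares_and_count n → Spec_sum_of_prime_squares_and_count n (sum_of_prime_squares_and_count n)

-- ===== LEMMAS AND PROOFS =====

-- A's inner loop returns true iff no j in the list divides i
theorem pvTrialA_eq_true_iff (i : Int) (l : List Int) :
    pvTrialA i l = true ↔ ∀ j ∈ l, ¬ j ∣ i := by
  induction l with
  | nil => simp [pvTrialA]
  | cons j rest ih =>
    by_cases h : PySem.Int.mod i j = 0
    · have hd : j ∣ i := (PySem.Int.mod_eq_zero_iff_dvd i j).mp h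
      simp [pvTrialA, h, hd]
    · simp only [pvTrialA, beq_iff_eq, h, if_false, ih, List.mem_cons]
      constructor
      · rintro hall k (rfl | hk)
        · exact fun hdvd => h ((PySem.Int.mod_eq_zero_iff_dvd i k).mpr hdvd)
        · exact hall k hk
      · intro hall k hk; exact hall k (Or.inr hk)

-- integer-composite characterisation
theorem pvNotPrime_iff (m : Int) (h2 : 2 ≤ m) :
    (¬ Nat.Prime m.toNat) ↔ ∃ d q : Int, 2 ≤ d ∧ 2 ≤ q ∧ d * q = m := by
  have hm : (m.toNat : Int) = m := Int.toNat_of_nonneg (by omega)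
  constructor
  · intro hnp
    obtain ⟨a, hadvd, ha2, halt⟩ := Nat.exists_dvd_of_not_prime2 (by omega) hnp
    obtain ⟨b, hb⟩ := hadvd
    refine ⟨(a : Int), (b : Int), by exact_mod_cast ha2, ?_, ?_⟩
    · have : 2 ≤ b := by nlinarith [hb, ha2, halt]
      exact_mod_cast this
    · rw [← hm, hb]; push_cast; ring
  · rintro ⟨d, q, hd, hq, hdq⟩ hp
    have hdn : (d.toNat : Int) = d := Int.toNat_of_nonneg (by omega)
    have hqn : (q.toNat : Int) = q := Int.toNat_of_nonneg (by omega)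
    have hmul : d.toNat * q.toNat = m.toNat := by
      have : ((d.toNat * q.toNat : Nat) : Int) = (m.toNat : Int) := by
        push_cast; rw [hdn, hqn, hm]; exact hdq
      exact_mod_cast this
    have hdvd : d.toNat ∣ m.toNat := ⟨q.toNat, hmul.symm⟩
    rcases hp.eq_one_or_self_of_dvd d.toNat hdvd with h1 | hself
    · omega
    · have : 2 ≤ d.toNat := by omega
      have : 2 ≤ q.toNat := by omega
      nlinarith [hmul, hself]

-- A's is_prime computes primality of i (negative i have toNat 0, not prime)
theorem pvIsPrimeA_eq (i : Int) : pvIsPrimeA i = decide (Nat.Prime i.toNat) := by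
  by_cases hi : i < 2
  · have hnp : ¬ Nat.Prime i.toNat := fun hp => by have := hp.two_le; omega
    simp [pvIsPrimeA, hi, hnp]
  · have h2 : 2 ≤ i := by omega
    have hm : (i.toNat : Int) = i := Int.toNat_of_nonneg (by omega)
    have hiff : pvTrialA i (PySem.List.pyRange 2 (pvSqrtA i + 1) 1) = true ↔ Nat.Prime i.toNat := by
      rw [pvTrialA_eq_true_iff]
      constructor
      · intro hall
        rw [Nat.prime_def_le_sqrt]
        refine ⟨by omega, fun a ha2 hasq hdvd => ?_⟩
        refine hall (a : Int) ?_ ?_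
        · rw [PySem.List.mem_pyRange_one]
          constructor
          · exact_mod_cast ha2
          · unfold pvSqrtA; omega
        · rw [← hm]; exact_mod_cast hdvd
      · intro hp j hj hdvd
        rw [PySem.List.mem_pyRange_one] at hj
        have hj2 : 2 ≤ j := hj.1
        have hjsq : j ≤ (Nat.sqrt i.toNat : Int) := by
          have := hj.2; unfold pvSqrtA at this; omega
        have hjn : (j.toNat : Int) = j := Int.toNat_of_nonneg (by omega)
        have hdvdN : j.toNat ∣ i.toNat := by
          rw [← Int.natCast_dvd_natCast, hjn, hm]; exact hdvd
        exact (Nat.prime_def_le_sqrt.mp hp).2 j.toNat (by omega) (by omega) hdvdN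
    rw [pvIsPrimeA, if_neg hi]
    cases hb : pvTrialA i (PySem.List.pyRange 2 (pvSqrtA i + 1) 1) with
    | true => exact (decide_eq_true (hiff.mp hb)).symm
    | false => exact (decide_eq_false (fun hp => by rw [hiff.mpr hp] at hb; cases hb)).symm

-- nested fold = fold over the flattened list
theorem pvFoldlFoldl {α β : Type} (l : List β) (g : β → List β) (f : α → β → α) (c : α) :
    l.foldl (fun c d => (g d).foldl f c) c = (l.flatMap g).foldl f c := by
  induction l generalizing c with
  | nil => simp
  | cons d t ih => simp [List.flatMap_cons, List.foldl_append, ih]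

-- the array fold of assignments, seen through toList
theorem pvSetFoldToList (L : List Int) (c : Array Bool) :
    (L.foldl (fun c m => c.setIfInBounds m.toNat true) c).toList
      = L.foldl (fun l m => l.set m.toNat true) c.toList := by
  induction L generalizing c with
  | nil => simp
  | cons m t ih => simp [List.foldl_cons, ih, Array.toList_setIfInBounds]

-- reading a cell after a fold of in-range assignments
theorem pvGetDFoldlSet (L : List Int) (c : List Bool) (i : Int) (hi : 0 ≤ i)
    (hL : ∀ m ∈ L, 0 ≤ m ∧ m < (c.length : Int)) :
    (L.foldl (fun l m => l.set m.toNat true) c).getD i.toNat false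
      = (c.getD i.toNat false || L.any (fun m => m == i)) := by
  induction L generalizing c with
  | nil => simp
  | cons m t ih =>
    have hm := hL m (List.mem_cons_self ..)
    simp only [List.foldl_cons, List.any_cons]
    rw [ih (c.set m.toNat true)
        (fun x hx => by rw [List.length_set]; exact hL x (List.mem_cons_of_mem _ hx))]
    have hget : (c.set m.toNat true).getD i.toNat false
        = if i.toNat = m.toNat then true else c.getD i.toNat false := by
      simp only [List.getD, List.getElem?_set]
      by_cases he : m.toNat = i.toNat
      · simp [he, show i.toNat < c.length by omega]
      · rw [if_neg he, if_neg (Ne.symm he)]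
    rw [hget]
    by_cases he : i = m
    · simp [he]
    · have hne : i.toNat ≠ m.toNat := by omega
      have : (m == i) = false := by simp; omega
      simp [hne, this]

-- the sieve cell i is set iff i is a nontrivial product (for 2 ≤ i ≤ n)
theorem pvSieve_marked (n i : Int) (h2 : 2 ≤ i) (hn : i ≤ n) :
    ((pvSieve n)[i.toNat]?.getD false) = true ↔
      ∃ d q : Int, 2 ≤ d ∧ 2 ≤ q ∧ d * q = i := by
  have hn0 : (0:Int) ≤ n := by omega
  unfold pvSieve
  rw [pvFoldlFoldl, if_pos hn0]
  rw [← Array.getElem?_toList, pvSetFoldToList, Array.toList_replicate]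
  have hlen : ((List.replicate (n + 1).toNat (false : Bool)).length : Int) = n + 1 := by
    simp; omega
  rw [← List.getD_eq_getElem?_getD, pvGetDFoldlSet _ _ i (by omega) ?hb]
  case hb =>
    intro m hm
    rw [List.mem_flatMap] at hm
    obtain ⟨d, hd, hmem⟩ := hm
    rw [PySem.List.mem_pyRange_one] at hd
    rw [PySem.List.mem_pyRange_iff_of_pos (by omega)] at hmem
    rw [hlen]; omega
  rw [List.getD_replicate false (by omega)]
  simp only [Bool.false_or, List.any_eq_true, beq_iff_eq, List.mem_flatMap]
  constructor
  · rintro ⟨m, ⟨d, hd, hmem⟩, rfl⟩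
    rw [PySem.List.mem_pyRange_one] at hd
    rw [PySem.List.mem_pyRange_iff_of_pos (by omega)] at hmem
    obtain ⟨hlo', hhi', ⟨k, hk⟩⟩ := hmem
    have hk0 : 0 ≤ k := by nlinarith [hk, hd.1]
    refine ⟨d, k + 2, by omega, by omega, by linarith [hk]⟩
  · rintro ⟨d, q, hd, hq, hdq⟩
    refine ⟨d * q, ⟨d, ?_, ?_⟩, hdq⟩
    · rw [PySem.List.mem_pyRange_one]
      refine ⟨by omega, ?_⟩
      have hle : d ≤ PySem.Int.floordiv n 2 := by
        rw [PySem.Int.le_floordiv_iff_mul_le (by omega)]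
        nlinarith [hdq]
      omega
    · rw [PySem.List.mem_pyRange_iff_of_pos (by omega)]
      refine ⟨by nlinarith, by omega, ⟨q - 2, by ring⟩⟩

-- ===== VERDICT (by name: the statement is the Claim_ definition above) =====
theorem sum_of_prime_squares_and_count_spec : Claim_equal_sum_of_prime_squares_and_count := by
  intro n _
  unfold Spec_sum_of_prime_squares_and_count sum_of_prime_squares_and_count sum_of_prime_squares_and_count_alt
  by_cases hn : n < 1
  · rw [PySem.List.pyRange_one_eq_nil (show n + 1 ≤ 1 by omega),
      PySem.List.pyRange_one_eq_nil (show n + 1 ≤ 2 by omega)]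
    simp
  · have hkey : List.foldl
        (fun (acc : Int × Int) i => if pvIsPrimeA i then (acc.1 + i ^ 2, acc.2 + 1) else acc)
        (0, 0) (PySem.List.pyRange 2 (n + 1) 1)
      = List.foldl
        (fun (acc : Int × Int) i =>
          if !((pvSieve n)[i.toNat]?.getD false) then (acc.1 + i * i, acc.2 + 1) else acc)
        (0, 0) (PySem.List.pyRange 2 (n + 1) 1) := by
      apply PySem.List.foldl_congr_mem
      intro acc i hi
      rw [PySem.List.mem_pyRange_one] at hi
      have h2 : 2 ≤ i := hi.1
      have hin : i ≤ n := by omega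
      have hmark := pvSieve_marked n i h2 hin
      have hcomp := pvNotPrime_iff i h2
      rw [pvIsPrimeA_eq]
      by_cases hp : Nat.Prime i.toNat
      · have hfalse : ((pvSieve n)[i.toNat]?.getD false) = false := by
          cases hb : ((pvSieve n)[i.toNat]?.getD false) with
          | false => rfl
          | true => exact absurd (hcomp.mpr (hmark.mp hb)) (not_not.mpr hp)
        simp [hp, hfalse, pow_two]
      · have htrue : ((pvSieve n)[i.toNat]?.getD false) = true :=
          hmark.mpr (hcomp.mp hp)
        simp [hp, htrue]
    rw [PySem.List.pyRange_one_cons (show (1:Int) < n + 1 by omega)]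
    simp only [List.foldl_cons]
    have h1 : pvIsPrimeA 1 = false := by norm_num [pvIsPrimeA]
    rw [h1]
    simp only [Bool.false_eq_true, if_false]
    have : (1:Int) + 1 = 2 := by norm_num
    rw [this, hkey]
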